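-- pv_equiv track=rewrite | github.com/randytarampi/awesomeProject | scheduler/algorithms/Schedule.py | getTimeGapForDay
-- ===== SOURCE A (Python) =====
-- def checkSlot(slotNumber, timeSlotArray):
--     return timeSlotArray[slotNumber]
--
-- def getTimeGapForDay(timeSlotArray):
--     totalGap = 0
--     marker = -1
--     for i in range (0, len(timeSlotArray)):
--         if (marker != -1):
--             if checkSlot(i, timeSlotArray) != 0:
--                 totalGap += (i-marker-1)
--                 marker = i
--         else :
--             if checkSlot(i, timeSlotArray) != 0:
--                 marker = i
--     return totalGap
-- ===== SOURCE B (Python) =====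
-- def getTimeGapForDay(timeSlotArray):
--     nz = [i for i, v in enumerate(timeSlotArray) if v != 0]
--     if len(nz) < 2:
--         return 0
--     return nz[-1] - nz[0] - (len(nz) - 1)
-- ===== Notes on version B (the rewrite author's own statement) =====
-- stated objective: simpler
-- what changed: Replaces the marker-accumulator state machine over indices with one comprehension collecting nonzero indices plus the closed-form last - first - (count - 1) (the summed inter-nonzero gaps telescope); the C-level comprehension and single arithmetic expression also remove per-iteration branching and indexing.
import Mathlib
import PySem

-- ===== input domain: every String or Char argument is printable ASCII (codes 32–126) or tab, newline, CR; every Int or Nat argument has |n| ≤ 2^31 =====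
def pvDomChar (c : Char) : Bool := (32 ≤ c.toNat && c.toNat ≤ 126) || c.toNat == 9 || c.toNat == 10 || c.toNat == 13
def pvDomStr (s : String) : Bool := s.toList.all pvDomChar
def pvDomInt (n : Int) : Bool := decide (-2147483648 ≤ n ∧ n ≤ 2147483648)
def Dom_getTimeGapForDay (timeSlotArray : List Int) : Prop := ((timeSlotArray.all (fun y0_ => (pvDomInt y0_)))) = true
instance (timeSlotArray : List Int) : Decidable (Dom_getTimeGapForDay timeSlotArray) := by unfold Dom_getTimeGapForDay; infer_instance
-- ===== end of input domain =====

-- B replaces A's marker/accumulator state machine by collecting the nonzero indices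
-- and a closed-form expression (simpler; same O(n) cost; return value only).

-- ===== PORT A =====
-- timeSlotArray[slotNumber]; inside getTimeGapForDay the index is always in range, so the default is never used
def checkSlot (slotNumber : Int) (timeSlotArray : List Int) : Int :=
  PySem.List.pyGetD timeSlotArray slotNumber 0

def getTimeGapForDay (timeSlotArray : List Int) : Int :=
  (((PySem.List.pyRange 0 (timeSlotArray.length : Int) 1).foldl
      (fun (st : Int × Int) i =>
        let totalGap := st.1
        let marker := st.2
        if marker ≠ -1 then
          if checkSlot i timeSlotArray ≠ 0 then (totalGap + (i - marker - 1), i)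
          else (totalGap, marker)
        else
          if checkSlot i timeSlotArray ≠ 0 then (totalGap, i)
          else (totalGap, marker))
      (0, -1))).1

-- ===== PORT B =====
def getTimeGapForDay_alt (timeSlotArray : List Int) : Int :=
  let nz : List Int := ((PySem.List.enumerate timeSlotArray 0).filter (fun p => p.2 ≠ 0)).map (fun p => p.1)
  if nz.length < 2 then 0
  else PySem.List.pyGetD nz (-1) 0 - PySem.List.pyGetD nz 0 0 - ((nz.length : Int) - 1)

-- ===== PRECONDITION & SPEC =====
def Spec_getTimeGapForDay (timeSlotArray : List Int) (out : Int) : Prop := out = getTimeGapForDay_alt timeSlotArray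
instance (timeSlotArray : List Int) (out : Int) : Decidable (Spec_getTimeGapForDay timeSlotArray out) := by unfold Spec_getTimeGapForDay; infer_instance

-- ===== CLAIM (what is proved, stated in full; the proofs are below) =====
def Claim_equal_getTimeGapForDay : Prop := ∀ (timeSlotArray : List Int), Dom_getTimeGapForDay timeSlotArray → Spec_getTimeGapForDay timeSlotArray (getTimeGapForDay timeSlotArray)

-- ===== LEMMAS AND PROOFS =====

-- A's loop body, as a function of the pair (index, value)
def stepA (st : Int × Int) (p : Int × Int) : Int × Int :=
  if st.2 ≠ -1 then
    if p.2 ≠ 0 then (st.1 + (p.1 - st.2 - 1), p.1) else st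
  else
    if p.2 ≠ 0 then (st.1, p.1) else st

-- A's loop restricted to the nonzero indices
def stepNZ (st : Int × Int) (i : Int) : Int × Int :=
  if st.2 ≠ -1 then (st.1 + (i - st.2 - 1), i) else (st.1, i)

lemma foldl_stepA_eq_stepNZ (es : List (Int × Int)) (st : Int × Int) :
    es.foldl stepA st = ((es.filter (fun p => p.2 ≠ 0)).map (fun p => p.1)).foldl stepNZ st := by
  induction es generalizing st with
  | nil => rfl
  | cons p es ih =>
    by_cases hv : p.2 = 0
    · have hst : stepA st p = st := by unfold stepA; simp [hv]
      simp only [List.foldl_cons, hst, List.filter_cons, hv]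
      simpa using ih st
    · have hst : stepA st p = stepNZ st p.1 := by
        unfold stepA stepNZ; split_ifs <;> simp_all
      simp only [List.foldl_cons, hst, List.filter_cons]
      rw [if_pos (by simpa using hv)]
      simpa using ih (stepNZ st p.1)

lemma foldl_stepNZ_closed (nz : List Int) (g m : Int) (hm : 0 ≤ m)
    (hnz : ∀ x ∈ nz, 0 ≤ x) (hne : nz ≠ []) :
    (nz.foldl stepNZ (g, m)).1 = g + nz.getLast hne - m - (nz.length : Int) := by
  induction nz generalizing g m with
  | nil => exact absurd rfl hne
  | cons a rest ih =>
    have ha : 0 ≤ a := hnz a (List.mem_cons_self ..)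
    have hstep : stepNZ (g, m) a = (g + (a - m - 1), a) := by
      simp [stepNZ]; omega
    rcases rest with _ | ⟨b, rest'⟩
    · rw [List.foldl_cons, hstep]
      simp
      omega
    · have hrest : ∀ x ∈ b :: rest', 0 ≤ x := fun x hx => hnz x (List.mem_cons_of_mem _ hx)
      have hne' : (b :: rest') ≠ [] := by simp
      rw [List.foldl_cons, hstep]
      have := ih (g + (a - m - 1)) a ha hrest hne'
      rw [this, List.getLast_cons hne']
      simp only [List.length_cons]
      push_cast
      omega

lemma foldl_stepNZ_start (a : Int) (rest : List Int) (g : Int) :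
    ((a :: rest).foldl stepNZ (g, -1)) = rest.foldl stepNZ (g, a) := by
  simp [stepNZ]

lemma enumerate_fst_nonneg (xs : List Int) (p : Int × Int)
    (hp : p ∈ PySem.List.enumerate xs 0) : 0 ≤ p.1 := by
  rcases (PySem.List.mem_enumerate_iff xs 0 p).1 hp with ⟨k, hk, rfl⟩
  simp

-- ===== VERDICT (by name: the statement is the Claim_ definition above) =====
theorem getTimeGapForDay_spec : Claim_equal_getTimeGapForDay := by
  intro xs _
  show getTimeGapForDay xs = getTimeGapForDay_alt xs
  have hA : getTimeGapForDay xs = ((PySem.List.enumerate xs 0).foldl stepA (0, -1)).1 := by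
    rw [PySem.List.enumerate_eq_map_pyRange (d := 0), List.foldl_map]
    rfl
  rw [hA, foldl_stepA_eq_stepNZ]
  set es := PySem.List.enumerate xs 0 with hes
  set nz : List Int := ((es.filter (fun p => p.2 ≠ 0)).map (fun p => p.1)) with hnzdef
  have hnz : ∀ x ∈ nz, 0 ≤ x := by
    intro x hx
    rcases List.mem_map.1 hx with ⟨p, hp, rfl⟩
    exact enumerate_fst_nonneg xs p (List.mem_of_mem_filter hp)
  show (nz.foldl stepNZ (0, -1)).1 = getTimeGapForDay_alt xs
  have halt : getTimeGapForDay_alt xs =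
      (if nz.length < 2 then 0
       else PySem.List.pyGetD nz (-1) 0 - PySem.List.pyGetD nz 0 0 - ((nz.length : Int) - 1)) := rfl
  rcases nz with _ | ⟨a, rest⟩
  · simp [halt]
  · have ha : 0 ≤ a := hnz a (List.mem_cons_self ..)
    rw [foldl_stepNZ_start]
    rcases rest with _ | ⟨b, rest'⟩
    · simp [halt]
    · have hrest : ∀ x ∈ b :: rest', 0 ≤ x := fun x hx => hnz x (List.mem_cons_of_mem _ hx)
      have hne' : (b :: rest') ≠ [] := by simp
      rw [foldl_stepNZ_closed (b :: rest') 0 a ha hrest hne']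
      have hlen : ¬ (a :: b :: rest').length < 2 := by simp
      rw [halt, if_neg hlen]
      have hfull : (a :: b :: rest') ≠ [] := by simp
      rw [PySem.List.pyGetD_neg_one _ _ hfull, PySem.List.pyGetD_zero_cons]
      rw [List.getLast_cons hne']
      simp only [List.length_cons]
      push_cast
      omega
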